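-- pv_equiv track=rewrite | github.com/PoonLab/gromstole | scripts/seq_utils.py | batch_fasta
-- ===== SOURCE A (Python) =====
-- def batch_fasta(gen, size=100):
--     """
--     Concatenate sequence records in stream into FASTA-formatted text in batches of
--     <size> records.
--     :param gen:  generator, return value of load_gisaid()
--     :param size:  int, number of records per batch
--     :yield:  str, list; FASTA-format string and list of records (dict) in batch
--     """
--     stdin = ''
--     batch = []
--     for i, record in enumerate(gen, 1):
--         qname, sequence = record
--         stdin += '>{}\n{}\n'.format(qname, sequence)
--         if i > 0 and i % size == 0:
--             yield stdin
--             stdin = ''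
--
--     if stdin:
--         yield stdin
-- ===== SOURCE B (Python) =====
-- import itertools
--
--
-- def batch_fasta(gen, size=100):
--     """Chunk the record stream into batches of <size>, then format each batch."""
--     it = iter(gen)
--     while True:
--         chunk = list(itertools.islice(it, size))
--         if not chunk:
--             break
--         yield ''.join('>{}\n{}\n'.format(q, s) for q, s in chunk)
-- ===== Notes on version B (the rewrite author's own statement) =====
-- stated objective: idiomatic
-- what changed: Replaces A's running-string accumulator with an enumerate counter and `i % size` modulo test by explicit chunking: islice the iterator into batches of <size> records and format each whole batch with one ''.join.
-- outside the precondition, e.g. on batch_fasta([('a', 'b')], -1): A returns ['>a\nb\n'], B raises ValueError; on batch_fasta([('a', 'b')], 0): A raises ZeroDivisionError, B returns []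
import Mathlib
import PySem

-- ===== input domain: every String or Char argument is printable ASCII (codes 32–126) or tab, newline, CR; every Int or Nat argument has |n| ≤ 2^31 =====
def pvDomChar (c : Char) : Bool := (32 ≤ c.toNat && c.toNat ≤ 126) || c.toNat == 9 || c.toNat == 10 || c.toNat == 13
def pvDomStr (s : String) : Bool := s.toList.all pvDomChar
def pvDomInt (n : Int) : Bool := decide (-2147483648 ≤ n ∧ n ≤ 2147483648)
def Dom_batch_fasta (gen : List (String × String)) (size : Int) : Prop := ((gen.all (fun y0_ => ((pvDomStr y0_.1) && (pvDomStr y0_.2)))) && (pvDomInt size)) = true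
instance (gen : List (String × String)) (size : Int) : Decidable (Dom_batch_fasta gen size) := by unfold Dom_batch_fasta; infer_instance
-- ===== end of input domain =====

-- B replaces A's running string + `i % size` modulo test by explicit chunking
-- (take a batch of `size` records, then format it with one join); return-value
-- equivalence only (the Pythons are generators; outputs compared as lists).

-- ===== PORT A =====
-- '>{}\n{}\n'.format(qname, sequence), as a list of code points (strings are
-- handled on the List Char side throughout, wrapped by String.ofList at a yield)
def pvFmtRecord (r : String × String) : List Char :=
  '>' :: r.1.toList ++ '\n' :: r.2.toList ++ ['\n']

-- the for-loop of A: state = (counter i, accumulated stdin); the trailing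
-- `if stdin: yield stdin` is the base case of the recursion
def pvLoopA (size : Int) : List (String × String) → Int → List Char → List String
  | [], _, stdin => if stdin = [] then [] else [String.ofList stdin]
  | r :: rest, i, stdin =>
      let stdin2 := stdin ++ pvFmtRecord r
      if i > 0 ∧ PySem.Int.mod i size = 0 then
        String.ofList stdin2 :: pvLoopA size rest (i + 1) []
      else
        pvLoopA size rest (i + 1) stdin2

def batch_fasta (gen : List (String × String)) (size : Int) : List String :=
  pvLoopA size gen 1 []

-- ===== PORT B =====
-- ''.join('>{}\n{}\n'.format(q, s) for q, s in chunk)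
def pvChunkStr (chunk : List (String × String)) : String :=
  String.ofList (chunk.map pvFmtRecord).flatten

-- the while-loop of B, chunk size m+1 (islice drains take (m+1), loop on the rest)
def pvGoB (m : Nat) : List (String × String) → List String
  | [] => []
  | r :: rest => pvChunkStr ((r :: rest).take (m + 1)) :: pvGoB m ((r :: rest).drop (m + 1))
termination_by l => l.length
decreasing_by simp [List.length_drop]

def batch_fasta_alt (gen : List (String × String)) (size : Int) : List String :=
  if size ≤ 0 then [] else pvGoB (size.toNat - 1) gen

-- ===== PRECONDITION & SPEC =====
-- Pre_ excludes size < 0, where A returns (its `i % size == 0` test yields on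
-- multiples of |size|) but B's islice raises ValueError, and size = 0 with a
-- nonempty gen, where A itself raises ZeroDivisionError.
def Pre_batch_fasta (gen : List (String × String)) (size : Int) : Prop :=
  0 < size ∨ (size = 0 ∧ gen = [])
instance (gen : List (String × String)) (size : Int) : Decidable (Pre_batch_fasta gen size) := by
  unfold Pre_batch_fasta; infer_instance

def pvWitness_batch_fasta : (List (String × String)) × Int := ([("q1", "ACGT"), ("q2", "TTAA")], 2)

def Spec_batch_fasta (gen : List (String × String)) (size : Int) (out : List String) : Prop := out = batch_fasta_alt gen size
instance (gen : List (String × String)) (size : Int) (out : List String) : Decidable (Spec_batch_fasta gen size out) := by unfold Spec_batch_fasta; infer_instance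

-- ===== CLAIM (what is proved, stated in full; the proofs are below) =====
def Claim_equal_batch_fasta : Prop := ∀ (gen : List (String × String)) (size : Int), Dom_batch_fasta gen size → Pre_batch_fasta gen size → Spec_batch_fasta gen size (batch_fasta gen size)

-- ===== LEMMAS AND PROOFS =====

-- bridge loop: r = number of records still to take before the next flush
def pvH (n : Nat) : List (String × String) → Nat → List Char → List String
  | [], _, st => if st = [] then [] else [String.ofList st]
  | r :: rest, cnt, st =>
      let st2 := st ++ pvFmtRecord r
      if cnt ≤ 1 then String.ofList st2 :: pvH n rest n []
      else pvH n rest (cnt - 1) st2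

-- counter arithmetic: the yield test of A in terms of the countdown
lemma pv_mod_step (size i : Int) (hs : 0 < size) :
    i % size = if (i - 1) % size = size - 1 then 0 else (i - 1) % size + 1 := by
  have h0 : (0:Int) ≤ (i - 1) % size := Int.emod_nonneg _ (by omega)
  have h1 : (i - 1) % size < size := Int.emod_lt_of_pos _ hs
  obtain ⟨q, hq⟩ : ∃ q, i = size * q + ((i - 1) % size + 1) :=
    ⟨(i - 1) / size, by have := Int.mul_ediv_add_emod (i - 1) size; omega⟩
  by_cases hc : (i - 1) % size = size - 1
  · rw [if_pos hc]
    have hdvd : size ∣ i := ⟨q + 1, by rw [hq, hc]; ring⟩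
    exact Int.emod_eq_zero_of_dvd hdvd
  · rw [if_neg hc]
    conv_lhs => rw [hq]
    rw [show size * q + ((i - 1) % size + 1) = (i - 1) % size + 1 + size * q by ring,
      Int.add_mul_emod_self_left]
    exact Int.emod_eq_of_lt (by omega) (by omega)

lemma pv_loopA_eq_H (size : Int) (hs : 0 < size) :
    ∀ (l : List (String × String)) (i : Int), 1 ≤ i → ∀ st,
      pvLoopA size l i st = pvH size.toNat l (size - (i - 1) % size).toNat st := by
  intro l
  induction l with
  | nil => intro i hi st; simp [pvLoopA, pvH]
  | cons r rest ih =>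
    intro i hi st
    have ha : (0:Int) ≤ (i - 1) % size := Int.emod_nonneg _ (by omega)
    have hb : (i - 1) % size < size := Int.emod_lt_of_pos _ hs
    have ha' : (0:Int) ≤ i % size := Int.emod_nonneg _ (by omega)
    have hmod : PySem.Int.mod i size = i % size := PySem.Int.mod_eq_emod_of_pos hs
    have hstep := pv_mod_step size i hs
    simp only [pvLoopA, pvH, hmod]
    by_cases hc : (i - 1) % size = size - 1
    · rw [if_pos hc] at hstep
      rw [if_pos ⟨by omega, hstep⟩, if_pos (by omega : (size - (i - 1) % size).toNat ≤ 1)]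
      rw [ih (i + 1) (by omega) []]
      have : (i + 1 - 1) % size = 0 := by rw [show i + 1 - 1 = i by ring, hstep]
      rw [this, sub_zero]
    · rw [if_neg hc] at hstep
      have hne : ¬ (i > 0 ∧ i % size = 0) := by
        rintro ⟨-, h0⟩; omega
      rw [if_neg hne, if_neg (by omega : ¬ (size - (i - 1) % size).toNat ≤ 1)]
      rw [ih (i + 1) (by omega) (st ++ pvFmtRecord r)]
      have : (i + 1 - 1) % size = (i - 1) % size + 1 := by
        rw [show i + 1 - 1 = i by ring, hstep]
      rw [this]
      congr 1
      omega

lemma pv_H_chunk (n : Nat) :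
    ∀ (l : List (String × String)) (r : Nat) (st : List Char), 1 ≤ r → l ≠ [] →
      pvH n l r st =
        if l.length < r then [String.ofList (st ++ (l.map pvFmtRecord).flatten)]
        else String.ofList (st ++ ((l.take r).map pvFmtRecord).flatten) :: pvH n (l.drop r) n [] := by
  intro l
  induction l with
  | nil => intro r st hr hne; exact absurd rfl hne
  | cons x rest ih =>
    intro r st hr hne
    rcases r with - | - | r'
    · omega
    · -- r = 1 : flush after this record
      simp [pvH, pvFmtRecord]
    · -- r = r' + 2
      have h2 : ¬ (r' + 1 + 1 ≤ 1) := by omega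
      simp only [pvH, if_neg h2, Nat.add_sub_cancel]
      by_cases hre : rest = []
      · subst hre
        simp [pvH, pvFmtRecord, show (1:Nat) < r' + 1 + 1 by omega]
      · rw [ih (r' + 1) (st ++ pvFmtRecord x) (by omega) hre]
        simp only [List.length_cons, List.take_succ_cons, List.drop_succ_cons,
          List.map_cons, List.flatten_cons, List.append_assoc]
        by_cases hl : rest.length < r' + 1
        · rw [if_pos hl, if_pos (by omega)]
        · rw [if_neg hl, if_neg (by omega)]

lemma pv_H_eq_goB (n : Nat) (hn : 1 ≤ n) :
    ∀ (k : Nat) (l : List (String × String)), l.length ≤ k → pvH n l n [] = pvGoB (n - 1) l := by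
  intro k
  induction k with
  | zero =>
    intro l hl
    have : l = [] := List.eq_nil_of_length_eq_zero (by omega)
    subst this; simp [pvH, pvGoB]
  | succ k ih =>
    intro l hl
    cases l with
    | nil => simp [pvH, pvGoB]
    | cons x rest =>
      rw [pv_H_chunk n (x :: rest) n [] hn (by simp)]
      have hgo : pvGoB (n - 1) (x :: rest)
          = pvChunkStr ((x :: rest).take (n - 1 + 1)) :: pvGoB (n - 1) ((x :: rest).drop (n - 1 + 1)) := by
        rw [pvGoB]
      rw [hgo, show n - 1 + 1 = n by omega]
      by_cases hlen : (x :: rest).length < n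
      · rw [if_pos hlen]
        rw [List.take_of_length_le (by omega), List.drop_of_length_le (by omega)]
        simp [pvGoB, pvChunkStr]
      · rw [if_neg hlen]
        have hl' : rest.length + 1 ≤ k + 1 := by simpa using hl
        rw [ih ((x :: rest).drop n) (by simp; omega)]
        simp [pvChunkStr]

-- ===== VERDICT (by name: the statement is the Claim_ definition above) =====
theorem batch_fasta_spec : Claim_equal_batch_fasta := by
  intro gen size _ hpre
  unfold Spec_batch_fasta batch_fasta batch_fasta_alt
  rcases hpre with hs | ⟨hz, hg⟩
  · have hn : 1 ≤ size.toNat := by omega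
    rw [if_neg (by omega)]
    rw [pv_loopA_eq_H size hs gen 1 (by omega) []]
    have : ((1:Int) - 1) % size = 0 := by simp
    rw [this, sub_zero]
    exact pv_H_eq_goB size.toNat hn gen.length gen le_rfl
  · subst hz hg
    simp [pvLoopA]
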